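-- pv_equiv track=rewrite | github.com/jeandsonmarques/Summarizer | plugin/power_bi_summarizer/report_view/report_chart_widget.py | _merge_ids
-- ===== SOURCE A (Python) =====
-- from typing import List
--
-- def _merge_ids(groups) -> List[int]:
--     merged = []
--     seen = set()
--     for group in groups or []:
--         for feature_id in group or []:
--             if feature_id in seen:
--                 continue
--             seen.add(feature_id)
--             merged.append(int(feature_id))
--     return merged
-- ===== SOURCE B (Python) =====
-- from typing import List
--
-- def _merge_ids(groups) -> List[int]:
--     flat = [x for g in (groups or []) for x in (g or [])]
--     # iterate in reverse so the FIRST occurrence's index wins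
--     first = {x: i for i, x in reversed(list(enumerate(flat)))}
--     return [int(flat[i]) for i in sorted(first.values())]
-- ===== Notes on version B (the rewrite author's own statement) =====
-- stated objective: alternative
-- what changed: Replaces A's single fused loop with a mutable seen-set by an index-based algorithm: build a value-to-first-occurrence-index map by iterating the flattened list in reverse (so the smallest index wins), then sort those indices and read the elements back off the flattened list.
import Mathlib
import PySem

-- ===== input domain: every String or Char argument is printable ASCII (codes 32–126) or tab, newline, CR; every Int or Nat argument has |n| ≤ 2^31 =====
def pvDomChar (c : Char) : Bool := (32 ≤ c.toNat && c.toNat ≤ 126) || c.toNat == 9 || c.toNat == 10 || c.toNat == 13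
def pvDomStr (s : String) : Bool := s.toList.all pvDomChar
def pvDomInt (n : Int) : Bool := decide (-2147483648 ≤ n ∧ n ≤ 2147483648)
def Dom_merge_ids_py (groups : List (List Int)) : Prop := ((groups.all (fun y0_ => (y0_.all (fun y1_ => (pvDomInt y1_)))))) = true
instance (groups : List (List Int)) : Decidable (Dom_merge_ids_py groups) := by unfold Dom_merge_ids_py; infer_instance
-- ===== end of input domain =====

-- B drops A's fused seen-set loop: it maps each value to its first-occurrence index (reverse
-- iteration, so the smallest index wins), sorts those indices and reads the elements back.
-- ===== PORT A =====
def merge_ids_py (groups : List (List Int)) : List Int :=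
  (groups.foldl (fun st group =>
      group.foldl (fun (st : List Int × PySem.Set Int) feature_id =>
          if PySem.Set.contains st.2 feature_id then st
          else (st.1 ++ [feature_id], PySem.Set.add st.2 feature_id)) st)
    (([] : List Int), (PySem.Set.empty : PySem.Set Int))).1

-- ===== PORT B =====
-- flat[i]: every i drawn from `first.values` is a stored enumerate index, hence a valid
-- nonnegative index, where pyGetD coincides with Python's flat[i].
def merge_ids_py_alt (groups : List (List Int)) : List Int :=
  let flat := groups.flatMap (fun g => g)
  let first := ((PySem.List.enumerate flat).reverse).foldl
      (fun (d : PySem.Dict Int Int) p => d.insert p.2 p.1) PySem.Dict.empty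
  (PySem.List.sorted (PySem.Dict.values first) (fun i => i) false).map
      (fun i => PySem.List.pyGetD flat i 0)

-- ===== PRECONDITION & SPEC =====
def Spec_merge_ids_py (groups : List (List Int)) (out : List Int) : Prop := out = merge_ids_py_alt groups
instance (groups : List (List Int)) (out : List Int) : Decidable (Spec_merge_ids_py groups out) := by unfold Spec_merge_ids_py; infer_instance

-- ===== CLAIM (what is proved, stated in full; the proofs are below) =====
def Claim_equal_merge_ids_py : Prop := ∀ (groups : List (List Int)), Dom_merge_ids_py groups → Spec_merge_ids_py groups (merge_ids_py groups)

-- ===== LEMMAS AND PROOFS =====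

-- the pairs of `enumerate flat` holding a first occurrence (proof-side characterisation)
def firstOccs (l : List Int) : List (Int × Int) :=
  (PySem.List.enumerate l).filter (fun p => !decide (p.2 ∈ l.take p.1.toNat))

-- A's inner loop keeps the pair (merged, seen) equal componentwise when started equal,
-- and both components evolve by Set.add.
theorem inner_pair (l : List Int) (s : PySem.Set Int) :
    l.foldl (fun (st : List Int × PySem.Set Int) x =>
        if PySem.Set.contains st.2 x then st
        else (st.1 ++ [x], PySem.Set.add st.2 x)) (s, s)
      = (l.foldl PySem.Set.add s, l.foldl PySem.Set.add s) := by
  induction l generalizing s with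
  | nil => rfl
  | cons x xs ih =>
      simp only [List.foldl_cons]
      by_cases h : x ∈ s
      · have ha : PySem.Set.add s x = s := by simp [PySem.Set.add, h]
        rw [if_pos (by simpa using h), ih, ha]
      · have ha : PySem.Set.add s x = s ++ [x] := by simp [PySem.Set.add, h]
        rw [if_neg (by simpa using h), ha, ih]

-- A's result is set(flattened) in first-occurrence order.
theorem merge_ids_py_eq (groups : List (List Int)) :
    merge_ids_py groups = PySem.Set.ofList (groups.flatMap (fun g => g)) := by
  rw [PySem.Set.ofList_eq_foldl, List.flatMap_id', List.foldl_flatten]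
  unfold merge_ids_py
  suffices h : ∀ (s : PySem.Set Int),
      groups.foldl (fun st group =>
          group.foldl (fun (st : List Int × PySem.Set Int) feature_id =>
              if PySem.Set.contains st.2 feature_id then st
              else (st.1 ++ [feature_id], PySem.Set.add st.2 feature_id)) st) (s, s)
        = (groups.foldl (fun s g => g.foldl PySem.Set.add s) s,
           groups.foldl (fun s g => g.foldl PySem.Set.add s) s) by
    rw [show (([] : List Int), (PySem.Set.empty : PySem.Set Int))
          = ((PySem.Set.empty : PySem.Set Int), (PySem.Set.empty : PySem.Set Int)) from rfl,
        h PySem.Set.empty]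
    rfl
  intro s
  induction groups generalizing s with
  | nil => rfl
  | cons g gs ih => simp only [List.foldl_cons, inner_pair, ih]

-- the first-occurrence pairs carry exactly set(l) as their second components
theorem mem_foldl_add (l : List Int) (s : PySem.Set Int) (x : Int) :
    x ∈ l.foldl PySem.Set.add s ↔ x ∈ s ∨ x ∈ l := by
  induction l generalizing s with
  | nil => simp
  | cons y ys ih =>
      simp only [List.foldl_cons, ih, PySem.Set.add]
      by_cases h : y ∈ s <;> by_cases hx : x = y <;> simp [h, hx]

theorem mapSnd_firstOccs (l : List Int) :
    (firstOccs l).map (fun p => p.2) = PySem.Set.ofList l := by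
  rw [PySem.Set.ofList_eq_foldl]
  unfold firstOccs
  induction l using List.reverseRecOn with
  | nil => rfl
  | append_singleton xs x ih =>
      rw [List.foldl_append, PySem.List.enumerate_append]
      have hfilter : ∀ p ∈ PySem.List.enumerate xs,
          (!decide (p.2 ∈ (xs ++ [x]).take p.1.toNat))
            = (!decide (p.2 ∈ xs.take p.1.toNat)) := by
        intro p hp
        obtain ⟨k, hk, rfl⟩ := (PySem.List.mem_enumerate_iff _ _ _).1 hp
        have hkk : ((0 : Int) + k).toNat = k := by omega
        rw [hkk, List.take_append_of_le_length (Nat.le_of_lt hk)]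
      rw [List.filter_append, List.filter_congr hfilter, List.map_append, ih]
      simp only [PySem.List.enumerate, List.foldl_cons, List.foldl_nil, PySem.Set.add]
      by_cases hx : x ∈ xs
      · have hmem : x ∈ xs.foldl PySem.Set.add ([] : PySem.Set Int) := by
          rw [mem_foldl_add]; right; exact hx
        simp [List.take_append_of_le_length (Nat.le_refl _), hx, hmem]
      · have hmem : x ∉ xs.foldl PySem.Set.add ([] : PySem.Set Int) := by
          rw [mem_foldl_add]; simp [hx]
        simp [List.take_append_of_le_length (Nat.le_refl _), hx, hmem]

-- last insert wins: a fold of inserts is looked up through find? on the reversed pair list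
theorem get?_foldl_insert (ps : List (Int × Int)) (d : PySem.Dict Int Int) (k : Int) :
    (ps.foldl (fun d p => d.insert p.2 p.1) d).get? k
      = match ps.reverse.find? (fun p => p.2 == k) with
        | some p => some p.1
        | none => d.get? k := by
  induction ps using List.reverseRecOn generalizing d with
  | nil => rfl
  | append_singleton qs q ih =>
      rw [List.foldl_append, List.foldl_cons, List.foldl_nil, List.reverse_append]
      simp only [List.reverse_singleton, List.singleton_append, List.find?_cons]
      by_cases h : q.2 = k
      · simp [h, PySem.Dict.get?_insert_self]
      · have : (q.2 == k) = false := by simpa using h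
        rw [this]
        have hne : k ≠ q.2 := fun hkq => h hkq.symm
        rw [PySem.Dict.get?_insert_of_ne _ _ hne]
        exact ih d

-- in enumerate, the first pair whose value is l[k] is (s+k, l[k]) when k is a first occurrence
theorem find?_enumerate_firstocc (l : List Int) (s : Int) (k : Nat) (hk : k < l.length)
    (hnot : l[k] ∉ l.take k) :
    (PySem.List.enumerate l s).find? (fun q => q.2 == l[k]) = some (s + k, l[k]) := by
  induction l generalizing s k with
  | nil => simp at hk
  | cons y ys ih =>
      rw [PySem.List.enumerate_cons, List.find?_cons]
      cases k with
      | zero => simp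
      | succ k =>
          have hk' : k < ys.length := by simpa using hk
          have hget : (y :: ys)[k + 1] = ys[k] := by simp
          have hne : (y :: ys)[k + 1] ≠ y := by
            intro h
            exact hnot (by simp [List.take_succ_cons, h])
          have hpred : ((y : Int) == (y :: ys)[k + 1]) = false := by
            simpa using fun h => hne h.symm
          rw [hpred]
          have hnot' : ys[k] ∉ ys.take k := by
            intro h
            exact hnot (by simp [List.take_succ_cons, hget, h])
          have := ih (s + 1) k hk' (by simpa [hget] using hnot')
          rw [hget] at *
          rw [this]
          simp only []
          have harith : s + 1 + (k : Int) = s + ((k : Nat) + 1 : Nat) := by push_cast; omega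
          rw [harith]

-- members of firstOccs are genuine first occurrences: (k, l[k]) with l[k] not earlier
theorem mem_firstOccs (l : List Int) (p : Int × Int) (hp : p ∈ firstOccs l) :
    ∃ (k : Nat) (h : k < l.length), p = ((k : Int), l[k]) ∧ l[k] ∉ l.take k := by
  unfold firstOccs at hp
  have hmem := List.mem_of_mem_filter hp
  have hcond := List.of_mem_filter hp
  obtain ⟨k, hk, rfl⟩ := (PySem.List.mem_enumerate_iff _ _ _).1 hmem
  refine ⟨k, hk, by norm_num, ?_⟩
  have : ((0 : Int) + k).toNat = k := by omega
  rw [this] at hcond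
  simpa using hcond

-- the first-occurrence map's lookup at a first-occurrence value is its index
theorem get?_first (l : List Int) (p : Int × Int) (hp : p ∈ firstOccs l) :
    ((((PySem.List.enumerate l).reverse).foldl
        (fun (d : PySem.Dict Int Int) q => d.insert q.2 q.1) PySem.Dict.empty).get? p.2)
      = some p.1 := by
  rw [get?_foldl_insert, List.reverse_reverse]
  obtain ⟨k, hk, rfl, hnot⟩ := mem_firstOccs l p hp
  have := find?_enumerate_firstocc l 0 k hk hnot
  simp only [zero_add] at this
  rw [this]

-- ===== VERDICT (by name: the statement is the Claim_ definition above) =====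
theorem merge_ids_py_spec : Claim_equal_merge_ids_py := by
  intro groups _
  unfold Spec_merge_ids_py merge_ids_py_alt
  rw [merge_ids_py_eq]
  set flat := groups.flatMap (fun g => g) with hflat
  set first := ((PySem.List.enumerate flat).reverse).foldl
      (fun (d : PySem.Dict Int Int) p => d.insert p.2 p.1) PySem.Dict.empty with hfirst
  have hnodup : first.keys.Nodup :=
    PySem.Dict.nodup_keys_foldl_insert_key (ν := Int)
      ((PySem.List.enumerate flat).reverse) (fun (p : Int × Int) => p.2)
      (fun d p => p.1) PySem.Dict.empty (PySem.Dict.nodup_keys_empty)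
  have hkeys : first.keys = PySem.Set.ofList flat.reverse := by
    have h := PySem.Dict.keys_foldl_insert_key (ν := Int)
      ((PySem.List.enumerate flat).reverse) (fun (p : Int × Int) => p.2)
      (fun d p => p.1) PySem.Dict.empty
    rw [List.map_reverse, PySem.List.map_snd_enumerate] at h
    refine h.trans ?_
    rw [PySem.Set.ofList_eq_foldl]
    simp [PySem.Set.update, PySem.Dict.keys_empty]
  have hperm : first.keys.Perm ((firstOccs flat).map (fun p => p.2)) := by
    rw [mapSnd_firstOccs, hkeys]
    rw [List.perm_ext_iff_of_nodup (PySem.Set.nodup_ofList _) (PySem.Set.nodup_ofList _)]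
    intro a
    rw [PySem.Set.mem_ofList, PySem.Set.mem_ofList, List.mem_reverse]
  have hvperm : ((firstOccs flat).map (fun p => p.1)).Perm first.values := by
    rw [PySem.Dict.values_eq_map_keys first hnodup 0]
    have h1 : (first.keys.map (fun k => first.getD k 0)).Perm
        (((firstOccs flat).map (fun p => p.2)).map (fun k => first.getD k 0)) :=
      hperm.map _
    have h2 : ((firstOccs flat).map (fun p => p.2)).map (fun k => first.getD k 0)
        = (firstOccs flat).map (fun p => p.1) := by
      rw [List.map_map]
      refine List.map_congr_left ?_
      intro p hp
      exact PySem.Dict.getD_of_get?_eq_some first 0 (get?_first flat p hp)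
    rw [h2] at h1
    exact h1.symm
  have hpw : ((firstOccs flat).map (fun p => p.1)).Pairwise (fun a b => a < b) := by
    rw [List.pairwise_map]
    exact List.Pairwise.sublist List.filter_sublist (PySem.List.pairwise_lt_enumerate flat 0)
  show PySem.Set.ofList flat
      = (PySem.List.sorted first.values (fun i => i) false).map
          (fun i => PySem.List.pyGetD flat i 0)
  rw [PySem.List.sorted_eq_of_perm_of_pairwise_lt _ _ _ hvperm hpw]
  rw [List.map_map]
  rw [← mapSnd_firstOccs flat]
  refine (List.map_congr_left ?_)
  intro p hp
  obtain ⟨k, hk, rfl, -⟩ := mem_firstOccs flat p hp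
  simp only [Function.comp]
  rw [PySem.List.pyGetD_natCast, List.getD_eq_getElem _ _ hk]
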